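-- pv_equiv track=rewrite | github.com/OshcoshBagosh/Scarlet.AI | policy_aware_module.py | _contains_legal_advice_language
-- ===== SOURCE A (Python) =====
-- def _contains_legal_advice_language(text: str) -> bool:
--     """
--     Check if text contains language that sounds like legal advice.
--
--     Args:
--         text: Text to check
--
--     Returns:
--         True if legal advice language detected
--     """
--     legal_phrases = [
--         'you should hire',
--         'you need a lawyer',
--         'your legal rights',
--         'sue',
--         'lawsuit',
--         'legal action',
--     ]
--
--     text_lower = text.lower()
--     return any(phrase in text_lower for phrase in legal_phrases)
-- ===== SOURCE B (Python) =====
-- def _contains_legal_advice_language(text: str) -> bool: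
--     """Single left-to-right scan: at each position check whether any phrase starts there."""
--     legal_phrases = (
--         'you should hire',
--         'you need a lawyer',
--         'your legal rights',
--         'sue',
--         'lawsuit',
--         'legal action',
--     )
--     t = text.lower()
--     return any(
--         t.startswith(p, i)
--         for i in range(len(t) + 1)
--         for p in legal_phrases
--     )
-- ===== Notes on version B (the rewrite author's own statement) =====
-- stated objective: alternative
-- what changed: A tests the lowered text separately for each phrase using substring containment; B does a single left-to-right scan over positions of the lowered text, checking at each position whether any phrase starts there.
import Mathlib
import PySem

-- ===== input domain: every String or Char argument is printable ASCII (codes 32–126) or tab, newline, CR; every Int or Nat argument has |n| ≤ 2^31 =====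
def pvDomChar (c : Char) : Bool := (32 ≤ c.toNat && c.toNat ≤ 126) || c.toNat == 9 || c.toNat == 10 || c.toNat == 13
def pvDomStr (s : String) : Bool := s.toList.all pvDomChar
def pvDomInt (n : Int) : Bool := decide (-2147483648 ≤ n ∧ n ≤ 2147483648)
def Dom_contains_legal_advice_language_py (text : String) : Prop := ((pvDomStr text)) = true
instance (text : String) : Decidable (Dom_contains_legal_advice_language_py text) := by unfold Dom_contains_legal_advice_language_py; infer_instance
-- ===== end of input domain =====

-- B replaces A's per-phrase substring scans by a single left-to-right scan over positions,
-- checking at each position whether any phrase starts there (objective: alternative).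

-- ===== PORT A =====
-- the phrase list of A, in order
def pvLegalPhrases : List (List Char) :=
  ["you should hire".toList, "you need a lawyer".toList, "your legal rights".toList,
   "sue".toList, "lawsuit".toList, "legal action".toList]

-- any(phrase in text_lower for phrase in legal_phrases)
def contains_legal_advice_language_py (text : String) : Bool :=
  let textLower := PySem.Chars.lower text.toList
  pvLegalPhrases.any (fun phrase => PySem.Chars.isIn phrase textLower)

-- ===== PORT B =====
-- any(t.startswith(p, i) for i in range(len(t)+1) for p in legal_phrases);
-- t.startswith(p, i) with 0 ≤ i is exactly: p is a prefix of t[i:], i.e. startswith (t.drop i.toNat) p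
def contains_legal_advice_language_py_alt (text : String) : Bool :=
  let t := PySem.Chars.lower text.toList
  (PySem.List.pyRange 0 ((t.length : Int) + 1) 1).any (fun i =>
    pvLegalPhrases.any (fun p => PySem.Chars.startswith (t.drop i.toNat) p))

-- ===== PRECONDITION & SPEC =====
def Spec_contains_legal_advice_language_py (text : String) (out : Bool) : Prop := out = contains_legal_advice_language_py_alt text
instance (text : String) (out : Bool) : Decidable (Spec_contains_legal_advice_language_py text out) := by unfold Spec_contains_legal_advice_language_py; infer_instance

-- ===== CLAIM (what is proved, stated in full; the proofs are below) =====
def Claim_equal_contains_legal_advice_language_py : Prop := ∀ (text : String), Dom_contains_legal_advice_language_py text → Spec_contains_legal_advice_language_py text (contains_legal_advice_language_py text)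

-- ===== LEMMAS AND PROOFS =====

-- a list is an infix of t iff it is a prefix of some drop of t, with the offset in range(len(t)+1)
theorem pv_infix_iff_drop (p t : List Char) :
    p <:+: t ↔ ∃ i : Int, (0 ≤ i ∧ i < (t.length : Int) + 1) ∧ p <+: t.drop i.toNat := by
  constructor
  · rintro ⟨s, u, h⟩
    refine ⟨(s.length : Int), ⟨by positivity, ?_⟩, ⟨u, ?_⟩⟩
    · have : s.length ≤ t.length := by
        subst h; simp
      omega
    · have : t.drop s.length = p ++ u := by
        subst h; rw [List.append_assoc, List.drop_left]
      simpa using this.symm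
  · rintro ⟨i, _, r, hr⟩
    exact ⟨t.take i.toNat, r, by
      rw [List.append_assoc, hr, List.take_append_drop]⟩

-- the two scans agree on any lowered text
theorem pv_scan_eq (t : List Char) :
    pvLegalPhrases.any (fun phrase => PySem.Chars.isIn phrase t) =
      (PySem.List.pyRange 0 ((t.length : Int) + 1) 1).any (fun i =>
        pvLegalPhrases.any (fun p => PySem.Chars.startswith (t.drop i.toNat) p)) := by
  rw [Bool.eq_iff_iff]
  simp only [List.any_eq_true, PySem.Chars.isIn_iff_infix, PySem.Chars.startswith_iff,
    PySem.List.mem_pyRange_one]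
  constructor
  · rintro ⟨p, hp, hinf⟩
    obtain ⟨i, hi, hpre⟩ := (pv_infix_iff_drop p t).mp hinf
    exact ⟨i, hi, p, hp, hpre⟩
  · rintro ⟨i, hi, p, hp, hpre⟩
    exact ⟨p, hp, (pv_infix_iff_drop p t).mpr ⟨i, hi, hpre⟩⟩

-- ===== VERDICT (by name: the statement is the Claim_ definition above) =====
theorem contains_legal_advice_language_py_spec : Claim_equal_contains_legal_advice_language_py := by
  intro text _
  unfold Spec_contains_legal_advice_language_py
  unfold contains_legal_advice_language_py contains_legal_advice_language_py_alt
  exact pv_scan_eq (PySem.Chars.lower text.toList)
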